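-- pv_equiv track=rewrite | github.com/mbucchi/stuff | python/regex-verifier/main.py | to_regex
-- ===== SOURCE A (Python) =====
-- def to_regex(regexp, idx=0):
--     '''Transforms a prefix regular expression to an infix expression'''
--     curr = regexp[idx]
--     if curr == '+':
--         fst, idx = to_regex(regexp, idx + 1)
--         snd, idx = to_regex(regexp, idx)
--         return '(' + fst + '+' + snd + ')', idx
--     elif curr == '*':
--         res, idx = to_regex(regexp, idx + 1)
--         return '(' + res + ')*', idx
--     elif curr == '.':
--         fst, idx = to_regex(regexp, idx + 1)
--         snd, idx = to_regex(regexp, idx)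
--         return fst + snd, idx
--     elif curr == '\\':
--         idx += 1
--         curr = regexp[idx]
--     return curr, idx+1
-- ===== SOURCE B (Python) =====
-- def to_regex(regexp, idx=0):
--     '''Transforms a prefix regular expression to an infix expression.
--     Iterative reformulation: an explicit stack of pending operator frames
--     replaces the recursion of the original.'''
--     stack = []  # frames: ('+'|'.', None|first-operand) or ('*', None)
--     i = idx
--     while True:
--         c = regexp[i]
--         i += 1
--         if c == '+' or c == '.':
--             stack.append((c, None))
--             continue
--         if c == '*':
--             stack.append(('*', None))
--             continue
--         if c == '\\':
--             c = regexp[i]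
--             i += 1
--         res = c
--         while stack:
--             op, fst = stack[-1]
--             if op == '*':
--                 stack.pop()
--                 res = '(' + res + ')*'
--             elif fst is None:
--                 stack[-1] = (op, res)
--                 break
--             else:
--                 stack.pop()
--                 res = ('(' + fst + '+' + res + ')') if op == '+' else fst + res
--         else:
--             return res, i
-- ===== Notes on version B (the rewrite author's own statement) =====
-- stated objective: alternative
-- what changed: The recursive descent over the prefix expression is replaced by a single iterative scan that maintains an explicit stack of pending operator frames, filling operands and reducing frames as subexpressions complete; outputs and IndexError points are identical.
import Mathlib
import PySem

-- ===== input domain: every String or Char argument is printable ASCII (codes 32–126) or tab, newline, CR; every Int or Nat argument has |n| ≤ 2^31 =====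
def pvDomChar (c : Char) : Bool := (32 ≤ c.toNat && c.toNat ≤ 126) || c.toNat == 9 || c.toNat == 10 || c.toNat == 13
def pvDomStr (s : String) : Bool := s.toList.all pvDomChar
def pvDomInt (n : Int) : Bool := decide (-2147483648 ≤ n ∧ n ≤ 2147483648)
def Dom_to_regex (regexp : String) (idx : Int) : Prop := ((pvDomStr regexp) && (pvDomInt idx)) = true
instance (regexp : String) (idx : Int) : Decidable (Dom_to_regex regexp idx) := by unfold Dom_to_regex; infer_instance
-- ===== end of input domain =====

-- B rewrites the recursive prefix→infix converter as an iterative scan with an explicit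
-- stack of pending operator frames; same outputs and same IndexError points as A.

-- ===== PORT A =====
-- literal port of A's recursion; fuel only makes the recursion total (it is never
-- exhausted on inputs admitted by Pre_, see `toRegA_mono`/`soundA` below)
def toRegA (cs : List Char) : Nat → Int → Option (String × Int)
  | 0, _ => none
  | fuel+1, idx =>
    match PySem.List.pyGet? cs idx with
    | none => none
    | some curr =>
      if curr = '+' then
        match toRegA cs fuel (idx+1) with
        | none => none
        | some (fst, i1) =>
          match toRegA cs fuel i1 with
          | none => none
          | some (snd, i2) => some ("(" ++ fst ++ "+" ++ snd ++ ")", i2)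
      else if curr = '*' then
        match toRegA cs fuel (idx+1) with
        | none => none
        | some (res, i1) => some ("(" ++ res ++ ")*", i1)
      else if curr = '.' then
        match toRegA cs fuel (idx+1) with
        | none => none
        | some (fst, i1) =>
          match toRegA cs fuel i1 with
          | none => none
          | some (snd, i2) => some (fst ++ snd, i2)
      else if curr = '\\' then
        match PySem.List.pyGet? cs (idx+1) with
        | none => none
        | some c2 => some (String.ofList [c2], idx+2)
      else some (String.ofList [curr], idx+1)

def to_regex (regexp : String) (idx : Int) : String × Int :=
  (toRegA regexp.toList (2 * regexp.toList.length + 2) idx).getD ("", 0)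

-- ===== PORT B =====
-- a pending-operator frame of B's explicit stack
inductive BFrame where
  | op2  : Char → BFrame            -- '+' or '.' still waiting for its first operand
  | op2f : Char → String → BFrame   -- '+' or '.' holding its first operand
  | star : BFrame
deriving DecidableEq, Repr

-- B's inner reduce loop: feed a finished operand to the stack
def reduceB : List BFrame → String → Sum String (List BFrame)
  | [], res => .inl res
  | .star :: st, res => reduceB st ("(" ++ res ++ ")*")
  | .op2 c :: st, res => .inr (.op2f c res :: st)
  | .op2f c fst :: st, res =>
      reduceB st (if c = '+' then "(" ++ fst ++ "+" ++ res ++ ")" else fst ++ res)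

-- B's outer scan loop; fuel only makes the loop total (never exhausted under Pre_)
def loopB (cs : List Char) : Nat → List BFrame → Int → Option (String × Int)
  | 0, _, _ => none
  | fuel+1, st, i =>
    match PySem.List.pyGet? cs i with
    | none => none
    | some c =>
      if c = '+' ∨ c = '.' then loopB cs fuel (.op2 c :: st) (i+1)
      else if c = '*' then loopB cs fuel (.star :: st) (i+1)
      else if c = '\\' then
        match PySem.List.pyGet? cs (i+1) with
        | none => none
        | some c2 =>
          match reduceB st (String.ofList [c2]) with
          | .inl res => some (res, i+2)
          | .inr st' => loopB cs fuel st' (i+2)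
      else
        match reduceB st (String.ofList [c]) with
        | .inl res => some (res, i+1)
        | .inr st' => loopB cs fuel st' (i+1)

def to_regex_alt (regexp : String) (idx : Int) : String × Int :=
  (loopB regexp.toList (2 * regexp.toList.length + 2) [] idx).getD ("", 0)

-- ===== PRECONDITION & SPEC =====
-- token-arity scan: `consumeP l k = some m` iff k complete prefix expressions are a
-- prefix of l, of total length m
def consumeP : List Char → Nat → Option Nat
  | _, 0 => some 0
  | [], _+1 => none
  | c :: l, k+1 =>
    if c = '+' ∨ c = '.' then (consumeP l (k+2)).map (· + 1)
    else if c = '*' then (consumeP l (k+1)).map (· + 1)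
    else if c = '\\' then
      match l with
      | [] => none
      | _ :: l' => (consumeP l' k).map (· + 2)
    else (consumeP l k).map (· + 1)

-- the characters A reads, starting at index idx (negative indices read from the end
-- and continue into the front of the string, as Python indexing does)
def streamOf (cs : List Char) (idx : Int) : Option (List Char) :=
  if 0 ≤ idx then
    if idx ≤ (cs.length : Int) then some (cs.drop idx.toNat) else none
  else if -(cs.length : Int) ≤ idx then some (cs.drop (idx + cs.length).toNat ++ cs) else none

-- Pre_ holds exactly when A returns (no IndexError): a complete prefix expression
-- starts at idx
def Pre_to_regex (regexp : String) (idx : Int) : Prop :=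
  ((streamOf regexp.toList idx).map (fun l => (consumeP l 1).isSome)).getD false = true

instance (regexp : String) (idx : Int) : Decidable (Pre_to_regex regexp idx) := by
  unfold Pre_to_regex; infer_instance

def pvWitness_to_regex : String × Int := ("+a*b", 0)

def Spec_to_regex (regexp : String) (idx : Int) (out : String × Int) : Prop := out = to_regex_alt regexp idx
instance (regexp : String) (idx : Int) (out : String × Int) : Decidable (Spec_to_regex regexp idx out) := by unfold Spec_to_regex; infer_instance

-- ===== CLAIM (what is proved, stated in full; the proofs are below) =====
def Claim_equal_to_regex : Prop := ∀ (regexp : String) (idx : Int), Dom_to_regex regexp idx → Pre_to_regex regexp idx → Spec_to_regex regexp idx (to_regex regexp idx)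

-- ===== LEMMAS AND PROOFS =====

theorem consumeP_zero (l : List Char) : consumeP l 0 = some 0 := by rw [consumeP.eq_def]
theorem consumeP_nil (k : Nat) : consumeP [] (k+1) = none := by rw [consumeP.eq_def]
theorem consumeP_cons (c : Char) (l : List Char) (k : Nat) :
    consumeP (c :: l) (k+1) =
      (if c = '+' ∨ c = '.' then (consumeP l (k+2)).map (· + 1)
      else if c = '*' then (consumeP l (k+1)).map (· + 1)
      else if c = '\\' then
        match l with
        | [] => none
        | _ :: l' => (consumeP l' k).map (· + 2)
      else (consumeP l k).map (· + 1)) := by rw [consumeP.eq_def]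

theorem consume_le : ∀ (l : List Char) (k m : Nat), consumeP l k = some m → m ≤ l.length
  | l, 0, m, h => by rw [consumeP_zero] at h; simp at h; omega
  | [], k+1, m, h => by rw [consumeP_nil] at h; simp at h
  | c :: l, k+1, m, h => by
    rw [consumeP_cons] at h
    split_ifs at h with h1 h2 h3
    · obtain ⟨m', hm', rfl⟩ := Option.map_eq_some_iff.mp h
      have := consume_le l (k+2) m' hm'
      simp only [List.length_cons]; omega
    · obtain ⟨m', hm', rfl⟩ := Option.map_eq_some_iff.mp h
      have := consume_le l (k+1) m' hm'
      simp only [List.length_cons]; omega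
    · cases l with
      | nil => simp at h
      | cons d l' =>
        obtain ⟨m', hm', rfl⟩ := Option.map_eq_some_iff.mp h
        have := consume_le l' k m' hm'
        simp only [List.length_cons]; omega
    · obtain ⟨m', hm', rfl⟩ := Option.map_eq_some_iff.mp h
      have := consume_le l k m' hm'
      simp only [List.length_cons]; omega
termination_by l => l.length

theorem consume_pos (l : List Char) (k m : Nat) (h : consumeP l (k+1) = some m) : 1 ≤ m := by
  cases l with
  | nil => simp [consumeP] at h
  | cons c l =>
    rw [consumeP_cons] at h
    split_ifs at h
    · obtain ⟨m', hm', rfl⟩ := Option.map_eq_some_iff.mp h; omega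
    · obtain ⟨m', hm', rfl⟩ := Option.map_eq_some_iff.mp h; omega
    · cases l with
      | nil => simp at h
      | cons d l' => obtain ⟨m', hm', rfl⟩ := Option.map_eq_some_iff.mp h; omega
    · obtain ⟨m', hm', rfl⟩ := Option.map_eq_some_iff.mp h; omega

theorem consume_comp : ∀ (l : List Char) (j k m1 m2 : Nat),
    consumeP l j = some m1 → consumeP (l.drop m1) k = some m2 →
    consumeP l (j + k) = some (m1 + m2)
  | l, 0, k, m1, m2, h1, h2 => by
    rw [consumeP_zero] at h1
    obtain rfl : m1 = 0 := by simpa using h1.symm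
    simpa using h2
  | [], j+1, k, m1, m2, h1, h2 => by rw [consumeP_nil] at h1; simp at h1
  | c :: l, j+1, k, m1, m2, h1, h2 => by
    rw [consumeP_cons] at h1
    split_ifs at h1 with hc1 hc2 hc3
    · obtain ⟨m1', hm1', rfl⟩ := Option.map_eq_some_iff.mp h1
      rw [List.drop_succ_cons] at h2
      have := consume_comp l (j+2) k m1' m2 hm1' h2
      have harg : j + 1 + k = (j + k) + 1 := by omega
      have harg2 : j + 2 + k = (j + k) + 2 := by omega
      rw [harg2] at this
      rw [harg, consumeP_cons, if_pos hc1, this]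
      simp only [Option.map_some, Option.some.injEq]
      omega
    · obtain ⟨m1', hm1', rfl⟩ := Option.map_eq_some_iff.mp h1
      rw [List.drop_succ_cons] at h2
      have := consume_comp l (j+1) k m1' m2 hm1' h2
      have harg : j + 1 + k = (j + k) + 1 := by omega
      rw [harg] at this
      rw [harg, consumeP_cons, if_neg hc1, if_pos hc2, this]
      simp only [Option.map_some, Option.some.injEq]
      omega
    · cases l with
      | nil => simp at h1
      | cons d l' =>
        obtain ⟨m1', hm1', rfl⟩ := Option.map_eq_some_iff.mp h1
        rw [List.drop_succ_cons, List.drop_succ_cons] at h2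
        have := consume_comp l' j k m1' m2 hm1' h2
        have harg : j + 1 + k = (j + k) + 1 := by omega
        rw [harg, consumeP_cons, if_neg hc1, if_neg hc2, if_pos hc3]
        simp only [this, Option.map_some, Option.some.injEq]
        omega
    · obtain ⟨m1', hm1', rfl⟩ := Option.map_eq_some_iff.mp h1
      rw [List.drop_succ_cons] at h2
      have := consume_comp l j k m1' m2 hm1' h2
      have harg : j + 1 + k = (j + k) + 1 := by omega
      rw [harg, consumeP_cons, if_neg hc1, if_neg hc2, if_neg hc3, this]
      simp only [Option.map_some, Option.some.injEq]
      omega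
termination_by l => l.length

theorem consume_split : ∀ (l : List Char) (k m : Nat), consumeP l (k+1) = some m →
    ∃ m1 m2, consumeP l 1 = some m1 ∧ consumeP (l.drop m1) k = some m2 ∧ m = m1 + m2
  | [], k, m, h => by rw [consumeP_nil] at h; simp at h
  | c :: l, k, m, h => by
    rw [consumeP_cons] at h
    split_ifs at h with hc1 hc2 hc3
    · obtain ⟨m', hm', rfl⟩ := Option.map_eq_some_iff.mp h
      obtain ⟨a, b, ha, hb, rfl⟩ := consume_split l (k+1) m' hm'
      have ha1 : 1 ≤ a := consume_pos l 0 a ha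
      have hal : a ≤ l.length := consume_le l 1 a ha
      obtain ⟨b1, b2, hb1, hb2, rfl⟩ := consume_split (l.drop a) k b hb
      have hcomp : consumeP l 2 = some (a + b1) := consume_comp l 1 1 a b1 ha hb1
      refine ⟨1 + (a + b1), b2, ?_, ?_, by omega⟩
      · rw [consumeP_cons, if_pos hc1, hcomp]
        simp only [Option.map_some, Option.some.injEq]; omega
      · have hd : (c :: l).drop (1 + (a + b1)) = l.drop (a + b1) := by
          have h9 : 1 + (a + b1) = (a + b1) + 1 := by omega
          rw [h9, List.drop_succ_cons]
        rw [List.drop_drop] at hb2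
        rw [hd]; exact hb2
    · obtain ⟨m', hm', rfl⟩ := Option.map_eq_some_iff.mp h
      obtain ⟨a, b, ha, hb, rfl⟩ := consume_split l k m' hm'
      refine ⟨a + 1, b, ?_, ?_, by omega⟩
      · rw [consumeP_cons, if_neg hc1, if_pos hc2, ha]; rfl
      · rw [List.drop_succ_cons]; exact hb
    · cases l with
      | nil => simp at h
      | cons d l' =>
        obtain ⟨m', hm', rfl⟩ := Option.map_eq_some_iff.mp h
        refine ⟨2, m', ?_, ?_, by omega⟩
        · rw [consumeP_cons, if_neg hc1, if_neg hc2, if_pos hc3]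
          simp [consumeP_zero]
        · simpa using hm'
    · obtain ⟨m', hm', rfl⟩ := Option.map_eq_some_iff.mp h
      refine ⟨1, m', ?_, ?_, by omega⟩
      · rw [consumeP_cons, if_neg hc1, if_neg hc2, if_neg hc3, consumeP_zero]
        rfl
      · simpa using hm'
termination_by l => l.length

theorem stream_len (cs : List Char) (p : Int) (l : List Char) (h : streamOf cs p = some l) :
    l.length ≤ 2 * cs.length := by
  unfold streamOf at h
  split_ifs at h with h0 h1 h2
  all_goals injection h with h
  all_goals subst h; simp; omega

theorem stream_head (cs : List Char) (p : Int) (c : Char) (l : List Char)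
    (h : streamOf cs p = some (c :: l)) : PySem.List.pyGet? cs p = some c := by
  unfold streamOf at h
  split_ifs at h with h0 h1 h2
  all_goals injection h with h
  · have hget : cs[p.toNat]? = some c := by
      have h2 := congrArg (fun t => t[0]?) h
      simpa [List.getElem?_drop] using h2
    rw [PySem.List.pyGet?_of_nonneg cs h0]
    exact hget
  · have hjlt : (p + cs.length).toNat < cs.length := by omega
    have hget : cs[(p + cs.length).toNat]? = some c := by
      have h0' : (cs.drop (p + cs.length).toNat ++ cs)[0]? = some c := by rw [h]; rfl
      rw [List.getElem?_append_left (by simp; omega)] at h0'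
      simpa [List.getElem?_drop] using h0'
    have hk : p = -(((-p).toNat : Nat) : Int) := by omega
    rw [hk, PySem.List.pyGet?_neg_natCast cs (-p).toNat (by omega) (by omega)]
    have he : cs.length - (-p).toNat = (p + cs.length).toNat := by omega
    rw [he]
    exact hget

theorem stream_shift (cs : List Char) (p : Int) (c : Char) (l : List Char)
    (h : streamOf cs p = some (c :: l)) : streamOf cs (p + 1) = some l := by
  unfold streamOf at h ⊢
  by_cases h0 : 0 ≤ p
  · rw [if_pos h0] at h
    by_cases h1 : p ≤ (cs.length : Int)
    · rw [if_pos h1] at h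
      injection h with h
      have hlt : p.toNat < cs.length := by
        by_contra hge
        rw [List.drop_eq_nil_of_le (by omega)] at h
        simp at h
      rw [if_pos (by omega : (0:Int) ≤ p + 1), if_pos (by omega : p + 1 ≤ (cs.length : Int))]
      have ht : (p + 1).toNat = p.toNat + 1 := by omega
      have htl : cs.drop (p.toNat + 1) = l := by
        have h3 := congrArg List.tail h
        rw [List.tail_drop] at h3
        simpa using h3
      rw [ht, htl]
    · rw [if_neg h1] at h; simp at h
  · rw [if_neg h0] at h
    by_cases h2 : -(cs.length : Int) ≤ p
    · rw [if_pos h2] at h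
      injection h with h
      have hjlt : (p + cs.length).toNat < cs.length := by omega
      by_cases h3 : 0 ≤ p + 1
      · rw [if_pos h3, if_pos (by omega : p + 1 ≤ (cs.length : Int))]
        have ht : (p + 1).toNat = 0 := by omega
        rw [ht, List.drop_zero]
        have hlen1 : (cs.drop (p + cs.length).toNat).length = 1 := by simp; omega
        obtain ⟨x, hx⟩ := List.length_eq_one_iff.mp hlen1
        rw [hx] at h
        simp only [List.cons_append, List.nil_append] at h
        injection h with hxc hl
        rw [hl]
      · rw [if_neg h3, if_pos (by omega : -(cs.length : Int) ≤ p + 1)]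
        have hjj : (p + 1 + cs.length).toNat = (p + cs.length).toNat + 1 := by omega
        rw [hjj]
        cases hdj : cs.drop (p + cs.length).toNat with
        | nil =>
          exfalso
          have h4 := congrArg List.length hdj
          simp at h4
          omega
        | cons x t =>
          rw [hdj] at h
          simp only [List.cons_append] at h
          injection h with hxc hl
          have hdj1 : cs.drop ((p + cs.length).toNat + 1) = t := by
            have h5 := congrArg List.tail hdj
            rw [List.tail_drop] at h5
            simpa using h5
          rw [hdj1, hl]
    · rw [if_neg h2] at h; simp at h

theorem stream_dropn (cs : List Char) (d : Nat) :
    ∀ (p : Int) (l : List Char), streamOf cs p = some l → d ≤ l.length →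
    streamOf cs (p + d) = some (l.drop d) := by
  induction d with
  | zero => intro p l h _; simpa using h
  | succ d ih =>
    intro p l h hd
    cases l with
    | nil => simp at hd
    | cons c l' =>
      have hs1 := stream_shift cs p c l' h
      have h6 := ih (p + 1) l' hs1 (by simp at hd; omega)
      have harg : p + ((d + 1 : Nat) : Int) = (p + 1) + d := by push_cast; ring
      rw [harg, List.drop_succ_cons]
      exact h6

theorem toRegA_mono : ∀ (cs : List Char) (f f' : Nat) (p : Int) (r : String × Int),
    f ≤ f' → toRegA cs f p = some r → toRegA cs f' p = some r
  | cs, 0, f', p, r, hf, h => by simp [toRegA] at h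
  | cs, f+1, 0, p, r, hf, h => by omega
  | cs, f+1, f'+1, p, r, hf, h => by
    have hf' : f ≤ f' := by omega
    simp only [toRegA] at h ⊢
    cases hg : PySem.List.pyGet? cs p with
    | none => rw [hg] at h; simp at h
    | some c =>
      simp only [hg] at h ⊢
      split_ifs at h ⊢ with h1 h2 h3 h4
      · cases hr1 : toRegA cs f (p+1) with
        | none => simp [hr1] at h
        | some r1 =>
          obtain ⟨s1, i1⟩ := r1
          simp only [hr1] at h
          simp only [toRegA_mono cs f f' (p+1) (s1, i1) hf' hr1]
          cases hr2 : toRegA cs f i1 with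
          | none => simp [hr2] at h
          | some r2 =>
            obtain ⟨s2, i2⟩ := r2
            simp only [hr2] at h
            simp only [toRegA_mono cs f f' i1 (s2, i2) hf' hr2]
            exact h
      · cases hr1 : toRegA cs f (p+1) with
        | none => simp [hr1] at h
        | some r1 =>
          obtain ⟨s1, i1⟩ := r1
          simp only [hr1] at h
          simp only [toRegA_mono cs f f' (p+1) (s1, i1) hf' hr1]
          exact h
      · cases hr1 : toRegA cs f (p+1) with
        | none => simp [hr1] at h
        | some r1 =>
          obtain ⟨s1, i1⟩ := r1
          simp only [hr1] at h
          simp only [toRegA_mono cs f f' (p+1) (s1, i1) hf' hr1]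
          cases hr2 : toRegA cs f i1 with
          | none => simp [hr2] at h
          | some r2 =>
            obtain ⟨s2, i2⟩ := r2
            simp only [hr2] at h
            simp only [toRegA_mono cs f f' i1 (s2, i2) hf' hr2]
            exact h
      · exact h
      · exact h

theorem soundA : ∀ (cs l : List Char) (p : Int) (m : Nat),
    streamOf cs p = some l → consumeP l 1 = some m →
    ∃ s, toRegA cs (l.length + 1) p = some (s, p + m)
  | cs, [], p, m, hs, hc => by rw [consumeP_nil] at hc; simp at hc
  | cs, c :: l, p, m, hs, hc => by
    have hhead := stream_head cs p c l hs
    have hshift := stream_shift cs p c l hs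
    rw [consumeP_cons] at hc
    have hlen : (c :: l).length + 1 = (l.length + 1) + 1 := by simp
    rw [hlen]
    split_ifs at hc with h1 h2 h3
    · obtain ⟨m', hm', rfl⟩ := Option.map_eq_some_iff.mp hc
      obtain ⟨a, b, ha, hb, rfl⟩ := consume_split l 1 m' hm'
      have ha1 : 1 ≤ a := consume_pos l 0 a ha
      have hal : a ≤ l.length := consume_le l 1 a ha
      obtain ⟨s1, hs1⟩ := soundA cs l (p+1) a hshift ha
      have hstr2 : streamOf cs ((p+1) + a) = some (l.drop a) :=
        stream_dropn cs a (p+1) l hshift hal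
      obtain ⟨s2, hs2⟩ := soundA cs (l.drop a) ((p+1) + a) b hstr2 hb
      have hs2' : toRegA cs (l.length + 1) ((p+1) + a) = some (s2, (p+1) + a + b) :=
        toRegA_mono cs ((l.drop a).length + 1) (l.length + 1) _ _ (by simp only [List.length_drop]; omega) hs2
      set F := l.length + 1 with hF
      rcases h1 with h1 | h1 <;> subst h1
      · refine ⟨"(" ++ s1 ++ "+" ++ s2 ++ ")", ?_⟩
        simp only [toRegA, hhead, reduceIte, hs1, hs2']
        refine congrArg some ?_
        rw [Prod.mk.injEq]
        exact ⟨rfl, by push_cast; ring⟩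
      · refine ⟨s1 ++ s2, ?_⟩
        simp only [toRegA, hhead, reduceIte, hs1, hs2']
        refine congrArg some ?_
        rw [Prod.mk.injEq]
        exact ⟨rfl, by push_cast; ring⟩
    · subst h2
      obtain ⟨m', hm', rfl⟩ := Option.map_eq_some_iff.mp hc
      obtain ⟨s1, hs1⟩ := soundA cs l (p+1) m' hshift hm'
      set F := l.length + 1 with hF
      refine ⟨"(" ++ s1 ++ ")*", ?_⟩
      simp only [toRegA, hhead, reduceIte, hs1]
      refine congrArg some ?_
      rw [Prod.mk.injEq]
      exact ⟨rfl, by push_cast; ring⟩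
    · subst h3
      cases l with
      | nil => simp at hc
      | cons d l' =>
        simp only [consumeP_zero, Option.map_some, Option.some.injEq] at hc
        subst hc
        have hd2 : PySem.List.pyGet? cs (p+1) = some d := stream_head cs (p+1) d l' hshift
        refine ⟨String.ofList [d], ?_⟩
        simp only [toRegA, hhead, reduceIte, hd2]
        refine congrArg some ?_
        rw [Prod.mk.injEq]
        exact ⟨rfl, by push_cast; ring⟩
    · rw [consumeP_zero] at hc
      simp only [Option.map_some, Option.some.injEq] at hc
      subst hc
      have hA : ¬ c = '+' := fun hh => h1 (Or.inl hh)
      have hB : ¬ c = '.' := fun hh => h1 (Or.inr hh)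
      refine ⟨String.ofList [c], ?_⟩
      simp only [toRegA, hhead]
      rw [if_neg hA, if_neg h2, if_neg hB, if_neg h3]
      refine congrArg some ?_
      rw [Prod.mk.injEq]
      exact ⟨rfl, by push_cast; ring⟩
termination_by cs l => l.length
decreasing_by all_goals (simp only [List.length_drop, List.length_cons]; omega)

theorem simAB : ∀ (cs : List Char) (f : Nat) (p i' : Int) (s : String),
    toRegA cs f p = some (s, i') → ∀ st : List BFrame,
    ∃ k : Nat, (k : Int) ≤ i' - p ∧ ∀ g : Nat,
      loopB cs (g + k) st p =
        (match reduceB st s with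
         | .inl res => some (res, i')
         | .inr st' => loopB cs g st' i')
  | cs, 0, p, i', s, h, st => by simp [toRegA] at h
  | cs, f+1, p, i', s, h, st => by
    simp only [toRegA] at h
    cases hg : PySem.List.pyGet? cs p with
    | none => simp [hg] at h
    | some c =>
      simp only [hg] at h
      split_ifs at h with h1 h2 h3 h4
      · subst h1
        cases hr1 : toRegA cs f (p+1) with
        | none => simp [hr1] at h
        | some r1 =>
          obtain ⟨s1, i1⟩ := r1
          simp only [hr1] at h
          cases hr2 : toRegA cs f i1 with
          | none => simp [hr2] at h
          | some r2 =>
            obtain ⟨s2, i2⟩ := r2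
            simp only [hr2, Option.some.injEq, Prod.mk.injEq] at h
            obtain ⟨rfl, rfl⟩ := h
            obtain ⟨k1, hk1, H1⟩ := simAB cs f (p+1) i1 s1 hr1 (.op2 '+' :: st)
            obtain ⟨k2, hk2, H2⟩ := simAB cs f i1 i2 s2 hr2 (.op2f '+' s1 :: st)
            refine ⟨k1 + k2 + 1, by push_cast; omega, ?_⟩
            intro g
            have harg : g + (k1 + k2 + 1) = ((g + k2) + k1) + 1 := by omega
            rw [harg]
            simp only [loopB, hg, true_or, if_true]
            rw [H1 (g + k2)]
            simp only [reduceB]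
            rw [H2 g]
            simp only [reduceB, if_true]
      · subst h2
        cases hr1 : toRegA cs f (p+1) with
        | none => simp [hr1] at h
        | some r1 =>
          obtain ⟨s1, i1⟩ := r1
          simp only [hr1, Option.some.injEq, Prod.mk.injEq] at h
          obtain ⟨rfl, rfl⟩ := h
          obtain ⟨k1, hk1, H1⟩ := simAB cs f (p+1) i1 s1 hr1 (.star :: st)
          refine ⟨k1 + 1, by push_cast; omega, ?_⟩
          intro g
          have harg : g + (k1 + 1) = (g + k1) + 1 := by omega
          rw [harg]
          simp only [loopB, hg]
          rw [if_neg (by decide : ¬(('*' : Char) = '+' ∨ ('*' : Char) = '.'))]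
          simp only [if_true]
          rw [H1 g]
          simp only [reduceB]
      · subst h3
        cases hr1 : toRegA cs f (p+1) with
        | none => simp [hr1] at h
        | some r1 =>
          obtain ⟨s1, i1⟩ := r1
          simp only [hr1] at h
          cases hr2 : toRegA cs f i1 with
          | none => simp [hr2] at h
          | some r2 =>
            obtain ⟨s2, i2⟩ := r2
            simp only [hr2, Option.some.injEq, Prod.mk.injEq] at h
            obtain ⟨rfl, rfl⟩ := h
            obtain ⟨k1, hk1, H1⟩ := simAB cs f (p+1) i1 s1 hr1 (.op2 '.' :: st)
            obtain ⟨k2, hk2, H2⟩ := simAB cs f i1 i2 s2 hr2 (.op2f '.' s1 :: st)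
            refine ⟨k1 + k2 + 1, by push_cast; omega, ?_⟩
            intro g
            have harg : g + (k1 + k2 + 1) = ((g + k2) + k1) + 1 := by omega
            rw [harg]
            simp only [loopB, hg, or_true, if_true]
            rw [H1 (g + k2)]
            simp only [reduceB]
            rw [H2 g]
            simp only [reduceB]
            rw [if_neg (by decide : ¬('.' : Char) = '+')]
      · subst h4
        cases hg2 : PySem.List.pyGet? cs (p+1) with
        | none => simp [hg2] at h
        | some c2 =>
          simp only [hg2, Option.some.injEq, Prod.mk.injEq] at h
          obtain ⟨rfl, rfl⟩ := h
          refine ⟨1, by omega, ?_⟩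
          intro g
          simp only [loopB, hg]
          rw [if_neg (by decide : ¬(('\\' : Char) = '+' ∨ ('\\' : Char) = '.')),
              if_neg (by decide : ¬('\\' : Char) = '*')]
          simp only [if_true]
          simp only [hg2]
      · simp only [Option.some.injEq, Prod.mk.injEq] at h
        obtain ⟨rfl, rfl⟩ := h
        refine ⟨1, by omega, ?_⟩
        intro g
        simp only [loopB, hg]
        rw [if_neg (not_or.mpr ⟨h1, h3⟩), if_neg h2, if_neg h4]

-- ===== VERDICT (by name: the statement is the Claim_ definition above) =====
theorem to_regex_spec : Claim_equal_to_regex := by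
  intro regexp idx _hdom hpre
  unfold Spec_to_regex to_regex to_regex_alt
  set cs := regexp.toList with hcs
  unfold Pre_to_regex at hpre
  cases hs : streamOf cs idx with
  | none => rw [← hcs, hs] at hpre; simp at hpre
  | some l =>
    rw [← hcs, hs] at hpre
    simp only [Option.map_some, Option.getD_some] at hpre
    obtain ⟨m, hm⟩ := Option.isSome_iff_exists.mp hpre
    obtain ⟨s, hA⟩ := soundA cs l idx m hs hm
    have hlen := stream_len cs idx l hs
    have hA2 : toRegA cs (2 * cs.length + 2) idx = some (s, idx + m) :=
      toRegA_mono cs (l.length + 1) (2 * cs.length + 2) idx _ (by omega) hA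
    obtain ⟨k, hk, hloop⟩ := simAB cs (l.length + 1) idx (idx + m) s hA []
    have hm_le : m ≤ l.length := consume_le l 1 m hm
    have hk' : k ≤ 2 * cs.length + 2 := by omega
    have := hloop (2 * cs.length + 2 - k)
    rw [Nat.sub_add_cancel hk'] at this
    simp only [reduceB] at this
    rw [hA2, this]
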